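-- pv_equiv track=rewrite | github.com/dfhampshire/RInChI | rinchi_tools/conversion.py | _agent_harvester
-- ===== SOURCE A (Python) =====
-- def _agent_harvester(data, num_variations):
--     """
--     Parses agent variations from the leftover data at the end of a RD files
--
--     Args:
--         data: The leftover data at the end of the RD file
--         num_variations: The number of variation in the leftover data section
--
--     Returns:
--         A complete list of agent variation stored as a list of lists
--     """
--
--     def cleanup_agent(datum):
--         return datum.split('\n', 2)[2].rstrip()
--
--     agent_variations = []
--     for variation in range(0, num_variations):
--         agents = []
--         for datum in data:
--             if "VARIATION(%d)" % num_variations in datum: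
--                 item = cleanup_agent(datum).rstrip()
--                 if item not in agents:
--                     agents.append(item)
--         agent_variations.append(agents)
--     return agent_variations
-- ===== SOURCE B (Python) =====
-- def _agent_harvester(data, num_variations):
--     """Single pass over data collecting the deduplicated agent list once,
--     then replicate it (as independent copies) for each variation."""
--
--     def cleanup_agent(datum):
--         return datum.split('\n', 2)[2].rstrip()
--
--     if num_variations <= 0:
--         return []
--     tag = "VARIATION(%d)" % num_variations
--     seen = []
--     for datum in data:
--         if tag in datum:
--             item = cleanup_agent(datum).rstrip()
--             if item not in seen:
--                 seen.append(item)
--     return [list(seen) for _ in range(num_variations)]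
-- ===== Notes on version B (the rewrite author's own statement) =====
-- stated objective: faster
-- what changed: B scans data once to build the deduplicated agent list and replicates it num_variations times (with an early [] return for non-positive counts), instead of A's num_variations identical full scans; A's tag uses num_variations, not the loop index, so all variation lists are equal.
import Mathlib
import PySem

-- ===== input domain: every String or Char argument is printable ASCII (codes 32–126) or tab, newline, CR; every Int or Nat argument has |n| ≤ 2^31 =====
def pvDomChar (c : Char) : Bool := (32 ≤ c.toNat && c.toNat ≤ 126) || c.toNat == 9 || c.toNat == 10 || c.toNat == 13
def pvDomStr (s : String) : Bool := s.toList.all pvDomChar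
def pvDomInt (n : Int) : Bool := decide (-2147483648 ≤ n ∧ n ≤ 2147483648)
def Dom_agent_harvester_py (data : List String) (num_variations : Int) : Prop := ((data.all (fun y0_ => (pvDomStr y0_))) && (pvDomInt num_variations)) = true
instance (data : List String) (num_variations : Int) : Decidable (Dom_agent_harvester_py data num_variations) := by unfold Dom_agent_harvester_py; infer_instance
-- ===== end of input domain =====

-- B replaces A's num_variations identical full scans of `data` by ONE scan plus replication (alternative/faster by mechanism; return-value equivalence only).

-- shared helper: cleanup_agent(datum) = datum.split('\n', 2)[2].rstrip()
-- (the [2] index raises IndexError in Python when the split has < 3 parts; Pre_ excludes that, the port totalises with .getD "")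
def pvCleanupAgent (datum : String) : String :=
  PySem.Str.rstrip (((PySem.List.pyGet? ((PySem.Str.splitMax? datum "\n" 2).getD []) 2)).getD "")

-- ===== PORT A =====
def agent_harvester_py (data : List String) (num_variations : Int) : List (List String) :=
  (PySem.List.pyRange 0 num_variations 1).foldl
    (fun agent_variations _variation =>
      agent_variations ++
        [data.foldl
          (fun agents datum =>
            if PySem.Str.isIn ("VARIATION(" ++ PySem.Int.toStr num_variations ++ ")") datum then
              let item := PySem.Str.rstrip (pvCleanupAgent datum)
              if item ∈ agents then agents else agents ++ [item]
            else agents)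
          []])
    []

-- ===== PORT B =====
def agent_harvester_py_alt (data : List String) (num_variations : Int) : List (List String) :=
  if num_variations ≤ 0 then []
  else
    let tag := "VARIATION(" ++ PySem.Int.toStr num_variations ++ ")"
    let seen := data.foldl
      (fun seen datum =>
        if PySem.Str.isIn tag datum then
          let item := PySem.Str.rstrip (pvCleanupAgent datum)
          if item ∈ seen then seen else seen ++ [item]
        else seen)
      []
    (PySem.List.pyRange 0 num_variations 1).map (fun _ => seen)

-- ===== PRECONDITION & SPEC =====
-- Pre_ excludes exactly the inputs where the Python raises IndexError: a positive
-- num_variations together with some datum that contains the variation tag but splits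
-- into fewer than 3 pieces on '\n' (cleanup_agent's [2] is then out of range).
def Pre_agent_harvester_py (data : List String) (num_variations : Int) : Prop :=
  0 < num_variations →
    ∀ d ∈ data, PySem.Str.isIn ("VARIATION(" ++ PySem.Int.toStr num_variations ++ ")") d = true →
      ((PySem.Str.splitMax? d "\n" 2).getD []).length = 3
instance (data : List String) (num_variations : Int) : Decidable (Pre_agent_harvester_py data num_variations) := by unfold Pre_agent_harvester_py; infer_instance

def pvWitness_agent_harvester_py : List String × Int :=
  (["$RXN\nVARIATION(2)\nagent A\n", "junk"], 2)

def Spec_agent_harvester_py (data : List String) (num_variations : Int) (out : List (List String)) : Prop := out = agent_harvester_py_alt data num_variations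
instance (data : List String) (num_variations : Int) (out : List (List String)) : Decidable (Spec_agent_harvester_py data num_variations out) := by unfold Spec_agent_harvester_py; infer_instance

-- ===== CLAIM (what is proved, stated in full; the proofs are below) =====
def Claim_equal_agent_harvester_py : Prop := ∀ (data : List String) (num_variations : Int), Dom_agent_harvester_py data num_variations → Pre_agent_harvester_py data num_variations → Spec_agent_harvester_py data num_variations (agent_harvester_py data num_variations)

-- ===== LEMMAS AND PROOFS =====

theorem pyRange_nil_of_nonpos (b : Int) (h : b ≤ 0) : PySem.List.pyRange 0 b 1 = [] := by
  rw [PySem.List.pyRange_of_pos 0 b (by norm_num)]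
  simp [show ¬ (0 : Int) < b by omega]

-- ===== VERDICT (by name: the statement is the Claim_ definition above) =====
theorem agent_harvester_py_spec : Claim_equal_agent_harvester_py := by
  intro data num_variations _hdom _hpre
  unfold Spec_agent_harvester_py agent_harvester_py agent_harvester_py_alt
  by_cases h : num_variations ≤ 0
  · simp [h, pyRange_nil_of_nonpos _ h]
  · simp only [h, if_false]
    rw [PySem.List.foldl_append_singleton_eq_map
      (fun _ => data.foldl
        (fun agents datum =>
          if PySem.Str.isIn ("VARIATION(" ++ PySem.Int.toStr num_variations ++ ")") datum then
            let item := PySem.Str.rstrip (pvCleanupAgent datum)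
            if item ∈ agents then agents else agents ++ [item]
          else agents)
        [])]
    simp
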